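-- pv_equiv track=rewrite | github.com/greenroomman/traveltxter | workers/atlas_snapshot_capture.py | extract_stops
-- ===== SOURCE A (Python) =====
-- from typing import Any, Dict, List, Optional, Tuple
--
-- def extract_stops(offer: Any) -> int:
--     try:
--         stops = 0
--         for sl in offer.get("slices") or []:
--             stops += max(0, len(sl.get("segments") or []) - 1)
--         return stops
--     except Exception:
--         return 0
-- ===== SOURCE B (Python) =====
-- def extract_stops(offer):
--     try:
--         return _stops(offer.get("slices") or [])
--     except Exception:
--         return 0
--
--
-- def _stops(slices):
--     # recursion on the list of slices; a slice's stops are its segments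
--     # beyond the first, counted via the [1:] slice (no clamp needed)
--     if not slices:
--         return 0
--     segments = slices[0].get("segments") or []
--     return len(segments[1:]) + _stops(slices[1:])
-- ===== Notes on version B (the rewrite author's own statement) =====
-- stated objective: alternative
-- what changed: B replaces A's iterative accumulator with max(0, len-1) clamps by structural recursion on the slices list, counting each slice's stops as the length of its segments[1:] slice (slicing clamps at empty for free, so no max is needed).
import Mathlib
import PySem

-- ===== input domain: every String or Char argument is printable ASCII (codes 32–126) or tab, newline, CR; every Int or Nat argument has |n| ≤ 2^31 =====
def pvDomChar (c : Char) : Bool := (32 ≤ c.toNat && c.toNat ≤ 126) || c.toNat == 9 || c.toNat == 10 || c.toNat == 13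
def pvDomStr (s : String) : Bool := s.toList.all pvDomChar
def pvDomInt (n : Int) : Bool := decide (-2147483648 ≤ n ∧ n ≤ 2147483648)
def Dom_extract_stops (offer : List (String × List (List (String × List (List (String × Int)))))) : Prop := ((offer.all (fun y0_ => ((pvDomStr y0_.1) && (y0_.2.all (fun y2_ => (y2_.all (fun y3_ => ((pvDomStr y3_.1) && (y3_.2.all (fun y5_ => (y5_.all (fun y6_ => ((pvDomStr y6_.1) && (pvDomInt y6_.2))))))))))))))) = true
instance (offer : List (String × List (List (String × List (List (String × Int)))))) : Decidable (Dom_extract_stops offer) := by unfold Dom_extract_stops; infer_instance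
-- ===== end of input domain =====

-- B replaces A's iterative clamp-summing loop by structural recursion on the slices list,
-- counting each slice's stops as the length of its segments[1:] slice (alternative decomposition, same cost).

-- ===== PORT A =====
-- offer.get("slices") or [] : first-match lookup; None and [] both give [] (getD [] is exact here)
def extract_stops (offer : List (String × List (List (String × List (List (String × Int)))))) : Int :=
  let slices := (offer.lookup "slices").getD []
  slices.foldl (fun stops sl =>
    stops + max 0 (((sl.lookup "segments").getD []).length - 1 : Int)) 0

-- ===== PORT B =====
-- recursion on the slices list; segments[1:] ported with PySem.List.slice (some 1) none
def stopsRec (slices : List (List (String × List (List (String × Int))))) : Int :=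
  match slices with
  | [] => 0
  | sl :: rest =>
    let segments := (sl.lookup "segments").getD []
    ((PySem.List.slice segments (some 1) none).length : Int) + stopsRec rest

def extract_stops_alt (offer : List (String × List (List (String × List (List (String × Int)))))) : Int :=
  stopsRec ((offer.lookup "slices").getD [])

-- ===== PRECONDITION & SPEC =====
def Spec_extract_stops (offer : List (String × List (List (String × List (List (String × Int)))))) (out : Int) : Prop := out = extract_stops_alt offer
instance (offer : List (String × List (List (String × List (List (String × Int)))))) (out : Int) : Decidable (Spec_extract_stops offer out) := by unfold Spec_extract_stops; infer_instance

-- ===== CLAIM (what is proved, stated in full; the proofs are below) =====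
def Claim_equal_extract_stops : Prop := ∀ (offer : List (String × List (List (String × List (List (String × Int)))))), Dom_extract_stops offer → Spec_extract_stops offer (extract_stops offer)

-- ===== LEMMAS AND PROOFS =====

-- per-slice step: the clamp equals the length of the tail slice
theorem pv_step (segs : List (List (String × Int))) :
    max 0 ((segs.length : Int) - 1) = ((PySem.List.slice segs (some 1) none).length : Int) := by
  rw [PySem.List.slice_from_one]
  cases segs <;> simp

-- loop invariant: A's fold from s equals s plus B's recursive count
theorem pv_fold_eq (ls : List (List (String × List (List (String × Int))))) (s : Int) :
    ls.foldl (fun stops sl =>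
        stops + max 0 (((sl.lookup "segments").getD []).length - 1 : Int)) s
      = s + stopsRec ls := by
  induction ls generalizing s with
  | nil => simp [stopsRec]
  | cons sl rest ih =>
    rw [List.foldl_cons, ih]
    simp only [stopsRec, ← pv_step]
    ring

-- ===== VERDICT (by name: the statement is the Claim_ definition above) =====
theorem extract_stops_spec : Claim_equal_extract_stops := by
  intro offer _
  show extract_stops offer = extract_stops_alt offer
  unfold extract_stops extract_stops_alt
  simpa using pv_fold_eq ((offer.lookup "slices").getD []) 0
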